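-- pv_equiv track=rewrite | github.com/christian-oudard/project_euler | 275.py | format_sculpture
-- ===== SOURCE A (Python) =====
-- def format_sculpture(blocks):
--     blocks = list(blocks)
--     blocks.append((0, 0))
--     x_vals = []
--     y_vals = []
--     for x, y in blocks:
--         x_vals.append(x)
--         y_vals.append(y)
--     min_x = min(x_vals)
--     min_y = min(y_vals)
--     max_x = max(x_vals)
--     max_y = max(y_vals)
--     blocks = [(x - min_x, y - min_y) for x, y in blocks]
--     max_x -= min_x
--     max_y -= min_y
--     field = [[' '] * (max_x + 1) for _ in range(max_y + 1)]
--     for x, y in blocks: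
--         field[max_y - y][x] = '#'
--     return '\n'.join(''.join(row) for row in field)
-- ===== SOURCE B (Python) =====
-- def format_sculpture(blocks):
--     pts = list(blocks) + [(0, 0)]
--     xs = [p[0] for p in pts]
--     ys = [p[1] for p in pts]
--     min_x = min(xs)
--     max_x = max(xs)
--     min_y = min(ys)
--     max_y = max(ys)
--     s = {(x - min_x, y - min_y) for x, y in pts}
--     w = max_x - min_x + 1
--     h = max_y - min_y + 1
--     return '\n'.join(
--         ''.join('#' if (x, y) in s else ' ' for x in range(w))
--         for y in reversed(range(h)))
-- ===== Notes on version B (the rewrite author's own statement) =====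
-- stated objective: simpler
-- what changed: Instead of allocating a 2D character grid and mutating it cell by cell, B builds a set of normalized block coordinates once and generates each output character directly by a membership test while scanning rows top to bottom.
import Mathlib
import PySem

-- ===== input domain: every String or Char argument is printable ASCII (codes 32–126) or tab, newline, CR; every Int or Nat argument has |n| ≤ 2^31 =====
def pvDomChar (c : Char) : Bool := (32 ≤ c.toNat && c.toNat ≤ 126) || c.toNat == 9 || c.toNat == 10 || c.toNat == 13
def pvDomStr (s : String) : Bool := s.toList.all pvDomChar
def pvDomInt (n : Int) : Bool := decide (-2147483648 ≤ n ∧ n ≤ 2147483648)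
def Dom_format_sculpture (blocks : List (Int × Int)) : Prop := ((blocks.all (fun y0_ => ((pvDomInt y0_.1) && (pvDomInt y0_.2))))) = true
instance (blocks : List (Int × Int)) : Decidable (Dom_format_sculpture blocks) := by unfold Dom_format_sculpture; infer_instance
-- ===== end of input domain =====

-- B renders each cell directly by a set-membership test instead of allocating a 2D grid and mutating it cell by cell (objective: simpler).

-- ===== PORT A =====
-- literal port of A: collect coordinates, take bounds, build a blank field, set cells, join rows.
-- The .getD 0 defaults after min?/max? are unreachable: the lists contain the appended (0,0).
-- The .toNat on the write indices is exact: the normalized indices are provably nonnegative.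
def format_sculpture (blocks : List (Int × Int)) : String :=
  let blocks1 := blocks ++ [((0 : Int), (0 : Int))]
  let x_vals := blocks1.foldl (fun acc p => acc ++ [p.1]) []
  let y_vals := blocks1.foldl (fun acc p => acc ++ [p.2]) []
  let min_x := (PySem.List.min? x_vals (fun v => v)).getD 0
  let min_y := (PySem.List.min? y_vals (fun v => v)).getD 0
  let max_x := (PySem.List.max? x_vals (fun v => v)).getD 0
  let max_y := (PySem.List.max? y_vals (fun v => v)).getD 0
  let blocks2 := blocks1.map (fun p => (p.1 - min_x, p.2 - min_y))
  let mx := max_x - min_x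
  let my := max_y - min_y
  let field : List (List Char) :=
    (List.range (my + 1).toNat).map (fun _ => List.replicate (mx + 1).toNat ' ')
  let field2 := blocks2.foldl
    (fun f p =>
      PySem.List.pySetD f (my - p.2)
        (PySem.List.pySetD (PySem.List.pyGetD f (my - p.2) []) p.1 '#')) field
  PySem.Str.join "\n" (field2.map (fun row => String.ofList row))

-- ===== PORT B =====
-- literal port of B (Source B): bounds over the point list, a set of normalized points, each cell by membership.
def format_sculpture_alt (blocks : List (Int × Int)) : String :=
  let pts := blocks ++ [((0 : Int), (0 : Int))]
  let xs := pts.map (fun p => p.1)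
  let ys := pts.map (fun p => p.2)
  let min_x := (PySem.List.min? xs (fun v => v)).getD 0
  let max_x := (PySem.List.max? xs (fun v => v)).getD 0
  let min_y := (PySem.List.min? ys (fun v => v)).getD 0
  let max_y := (PySem.List.max? ys (fun v => v)).getD 0
  let s : PySem.Set (Int × Int) :=
    PySem.Set.ofList (pts.map (fun p => (p.1 - min_x, p.2 - min_y)))
  let w := (max_x - min_x + 1).toNat
  let h := (max_y - min_y + 1).toNat
  PySem.Str.join "\n" (((List.range h).reverse).map (fun (y : Nat) =>
    String.ofList ((List.range w).map (fun (x : Nat) =>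
      if PySem.Set.contains s ((x : Int), (y : Int)) then '#' else ' '))))


-- ===== PRECONDITION & SPEC =====
def Spec_format_sculpture (blocks : List (Int × Int)) (out : String) : Prop := out = format_sculpture_alt blocks
instance (blocks : List (Int × Int)) (out : String) : Decidable (Spec_format_sculpture blocks out) := by unfold Spec_format_sculpture; infer_instance

-- ===== CLAIM (what is proved, stated in full; the proofs are below) =====
def Claim_equal_format_sculpture : Prop := ∀ (blocks : List (Int × Int)), Dom_format_sculpture blocks → Spec_format_sculpture blocks (format_sculpture blocks)

-- ===== LEMMAS AND PROOFS =====

theorem pv_getD_set {α : Type} (xs : List α) (i j : Nat) (v d : α) (hi : i < xs.length) :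
    (xs.set i v).getD j d = if j = i then v else xs.getD j d := by
  simp only [List.getD_eq_getElem?_getD, List.getElem?_set]
  by_cases h : j = i
  · subst h; simp [hi]
  · simp [h, Ne.symm h]

def pvStep (my : Int) (f : List (List Char)) (p : Int × Int) : List (List Char) :=
  PySem.List.pySetD f (my - p.2)
    (PySem.List.pySetD (PySem.List.pyGetD f (my - p.2) []) p.1 '#')

theorem pv_grid (mx my : Int) (hmy : 0 ≤ my) (L : List (Int × Int)) (f : List (List Char))
    (hb : ∀ q ∈ L, 0 ≤ q.1 ∧ q.1 ≤ mx ∧ 0 ≤ q.2 ∧ q.2 ≤ my)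
    (hlen : f.length = (my + 1).toNat)
    (hrow : ∀ r, r < (my + 1).toNat → (f.getD r []).length = (mx + 1).toNat) :
    (L.foldl (pvStep my) f).length = (my + 1).toNat ∧
    (∀ r, r < (my + 1).toNat → ((L.foldl (pvStep my) f).getD r []).length = (mx + 1).toNat) ∧
    (∀ r c, r < (my + 1).toNat → c < (mx + 1).toNat →
      ((L.foldl (pvStep my) f).getD r []).getD c ' ' =
        if ((c : Int), my - (r : Int)) ∈ L then '#' else (f.getD r []).getD c ' ') := by
  induction L generalizing f with
  | nil => exact ⟨hlen, hrow, fun r c _ _ => by simp⟩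
  | cons q L ih =>
    obtain ⟨hq1, hq2, hq3, hq4⟩ := hb q (by simp)
    have hi0 : (0:Int) ≤ my - q.2 := by omega
    have hin : (my - q.2).toNat < f.length := by omega
    have hcn : q.1.toNat < (mx + 1).toNat := by omega
    -- unfold one step
    have hstep : pvStep my f q =
        f.set (my - q.2).toNat ((f.getD (my - q.2).toNat []).set q.1.toNat '#') := by
      unfold pvStep
      rw [PySem.List.pyGetD_eq_getElem f [] hi0 (by omega),
          PySem.List.pySetD_of_nonneg _ '#' hq1,
          PySem.List.pySetD_of_nonneg _ _ hi0,
          List.getD_eq_getElem f [] hin]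
    set f' := pvStep my f q with hf'
    have hlen' : f'.length = (my + 1).toNat := by rw [hstep]; simpa using hlen
    have hrowD : ∀ r, f'.getD r [] =
        if r = (my - q.2).toNat then (f.getD (my - q.2).toNat []).set q.1.toNat '#'
        else f.getD r [] := by
      intro r; rw [hstep]; exact pv_getD_set f (my - q.2).toNat r _ [] hin
    have hrow' : ∀ r, r < (my + 1).toNat → (f'.getD r []).length = (mx + 1).toNat := by
      intro r hr; rw [hrowD]
      split_ifs with h
      · subst h; rw [List.length_set]; exact hrow _ hr
      · exact hrow _ hr
    obtain ⟨g1, g2, g3⟩ := ih f' (fun p hp => hb p (by simp [hp])) hlen' hrow'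
    refine ⟨by simpa using g1, by simpa using g2, ?_⟩
    intro r c hr hc
    have hcell := g3 r c hr hc
    simp only [List.foldl_cons]
    rw [hcell]
    by_cases hmem : ((c : Int), my - (r : Int)) ∈ L
    · simp [hmem]
    · have hcf' : (f'.getD r []).getD c ' ' =
          if ((c : Int), my - (r : Int)) = q then '#' else (f.getD r []).getD c ' ' := by
        rw [hrowD]
        by_cases h1 : r = (my - q.2).toNat
        · subst h1
          rw [if_pos rfl, pv_getD_set _ q.1.toNat c '#' ' ' (by rw [hrow _ hr]; exact hcn)]
          have hiff : (((c : Int), my - ((my - q.2).toNat : Int)) = q) ↔ c = q.1.toNat := by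
            rw [Prod.ext_iff]
            constructor
            · rintro ⟨h, -⟩; omega
            · intro h; exact ⟨by omega, by omega⟩
          by_cases h2 : c = q.1.toNat
          · rw [if_pos h2, if_pos (hiff.mpr h2)]
          · rw [if_neg h2, if_neg (fun h => h2 (hiff.mp h))]
        · have hne : ¬ (((c : Int), my - (r : Int)) = q) := by
            intro h
            apply h1
            have := congrArg Prod.snd h; simp at this; omega
          simp [h1, hne]
      rw [hcf']
      simp [hmem, List.mem_cons]

theorem main_eq (blocks : List (Int × Int)) :
    format_sculpture blocks = format_sculpture_alt blocks := by
  unfold format_sculpture format_sculpture_alt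
  simp only [PySem.List.foldl_append_singleton_eq_map, List.nil_append]
  set pts := blocks ++ [((0 : Int), (0 : Int))] with hpts
  have hmem0 : ((0 : Int), (0 : Int)) ∈ pts := by simp [hpts]
  obtain ⟨mnx, hmnx⟩ : ∃ m, PySem.List.min? (pts.map (fun p => p.1)) (fun v => v) = some m := by
    cases h : PySem.List.min? (pts.map (fun p => p.1)) (fun v => v) with
    | none => exact absurd ((PySem.List.min?_eq_none_iff _ _).mp h) (by simp [hpts])
    | some m => exact ⟨m, rfl⟩
  obtain ⟨mxx, hmxx⟩ : ∃ m, PySem.List.max? (pts.map (fun p => p.1)) (fun v => v) = some m := by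
    cases h : PySem.List.max? (pts.map (fun p => p.1)) (fun v => v) with
    | none => exact absurd ((PySem.List.max?_eq_none_iff _ _).mp h) (by simp [hpts])
    | some m => exact ⟨m, rfl⟩
  obtain ⟨mny, hmny⟩ : ∃ m, PySem.List.min? (pts.map (fun p => p.2)) (fun v => v) = some m := by
    cases h : PySem.List.min? (pts.map (fun p => p.2)) (fun v => v) with
    | none => exact absurd ((PySem.List.min?_eq_none_iff _ _).mp h) (by simp [hpts])
    | some m => exact ⟨m, rfl⟩
  obtain ⟨mxy, hmxy⟩ : ∃ m, PySem.List.max? (pts.map (fun p => p.2)) (fun v => v) = some m := by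
    cases h : PySem.List.max? (pts.map (fun p => p.2)) (fun v => v) with
    | none => exact absurd ((PySem.List.max?_eq_none_iff _ _).mp h) (by simp [hpts])
    | some m => exact ⟨m, rfl⟩
  rw [hmnx, hmxx, hmny, hmxy]
  simp only [Option.getD_some]
  -- bounds
  have hlox : ∀ p ∈ pts, mnx ≤ p.1 := fun p hp =>
    PySem.List.min?_isMin hmnx p.1 (List.mem_map_of_mem hp)
  have hhix : ∀ p ∈ pts, p.1 ≤ mxx := fun p hp =>
    PySem.List.max?_isMax hmxx p.1 (List.mem_map_of_mem hp)
  have hloy : ∀ p ∈ pts, mny ≤ p.2 := fun p hp =>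
    PySem.List.min?_isMin hmny p.2 (List.mem_map_of_mem hp)
  have hhiy : ∀ p ∈ pts, p.2 ≤ mxy := fun p hp =>
    PySem.List.max?_isMax hmxy p.2 (List.mem_map_of_mem hp)
  set N := pts.map (fun p => (p.1 - mnx, p.2 - mny)) with hN
  set mx := mxx - mnx with hmx
  set my := mxy - mny with hmyd
  have hmx0 : 0 ≤ mx := by
    have h1 := hlox _ hmem0; have h2 := hhix _ hmem0; omega
  have hmy0 : 0 ≤ my := by
    have h1 := hloy _ hmem0; have h2 := hhiy _ hmem0; omega
  have hb : ∀ q ∈ N, 0 ≤ q.1 ∧ q.1 ≤ mx ∧ 0 ≤ q.2 ∧ q.2 ≤ my := by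
    intro q hq
    rw [hN] at hq
    obtain ⟨p, hp, rfl⟩ := List.mem_map.mp hq
    exact ⟨by have := hlox _ hp; omega, by have := hhix _ hp; omega,
           by have := hloy _ hp; omega, by have := hhiy _ hp; omega⟩
  set H := (my + 1).toNat with hH
  set W := (mx + 1).toNat with hW
  set f0 : List (List Char) := (List.range H).map (fun _ => List.replicate W ' ') with hf0
  have hf0len : f0.length = H := by simp [hf0]
  have hf0row : ∀ r, r < H → (f0.getD r []).length = W := by
    intro r hr
    rw [hf0, List.getD_eq_getElem _ _ (by simpa using hr)]
    simp
  have hfold : (N.foldl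
      (fun f p =>
        PySem.List.pySetD f (my - p.2)
          (PySem.List.pySetD (PySem.List.pyGetD f (my - p.2) []) p.1 '#')) f0)
      = N.foldl (pvStep my) f0 := rfl
  rw [hfold]
  obtain ⟨g1, g2, g3⟩ := pv_grid mx my hmy0 N f0 hb hf0len hf0row
  -- the field equals B's char rows
  have hfield : N.foldl (pvStep my) f0 =
      ((List.range H).reverse).map (fun (y : Nat) =>
        (List.range W).map (fun (x : Nat) =>
          if PySem.Set.contains (PySem.Set.ofList N) ((x : Int), (y : Int)) then '#' else ' ')) := by
    apply List.ext_getElem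
    · rw [g1]; simp only [List.length_map, List.length_reverse, List.length_range, hH]
    · intro r h1 h2
      have hrH : r < H := by rw [g1] at h1; exact h1
      simp only [List.getElem_map, List.getElem_reverse,
        List.length_range, List.getElem_range]
      apply List.ext_getElem
      · rw [← List.getD_eq_getElem _ [] h1, g2 r hrH]
        simp only [List.length_map, List.length_range, hW]
      · intro c hc1 hc2
        have hcW : c < W := by simpa using hc2
        have hcell := g3 r c hrH hcW
        have hrow0 : f0.getD r [] = List.replicate W ' ' := by
          rw [hf0, List.getD_eq_getElem _ _ (by simpa using hrH)]
          simp
        have hblank : (f0.getD r []).getD c ' ' = ' ' := by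
          rw [hrow0]
          simp only [List.getD_eq_getElem?_getD, List.getElem?_replicate]
          split <;> rfl
        rw [hblank] at hcell
        have hLc : (N.foldl (pvStep my) f0)[r]'h1 = ((N.foldl (pvStep my) f0).getD r []) := by
          rw [List.getD_eq_getElem _ [] h1]
        simp only [List.getElem_map, List.getElem_range]
        have hLcc : ((N.foldl (pvStep my) f0)[r]'h1)[c]'hc1
            = ((N.foldl (pvStep my) f0).getD r []).getD c ' ' := by
          rw [List.getD_eq_getElem _ [] h1, List.getD_eq_getElem _ ' ' hc1]
        rw [hLcc, hcell]
        have hrH' : r < (my + 1).toNat := hrH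
        have hcast : ((H - 1 - r : Nat) : Int) = my - (r : Int) := by
          rw [hH]; omega
        rw [hcast]
        by_cases hm : ((c : Int), my - (r : Int)) ∈ N
        · rw [if_pos hm, if_pos ?_]
          rw [PySem.Set.contains_iff, PySem.Set.mem_ofList]; exact hm
        · rw [if_neg hm, if_neg ?_]
          rw [PySem.Set.contains_iff, PySem.Set.mem_ofList]; exact hm
  rw [hfield, List.map_map]
  rfl

-- ===== VERDICT (by name: the statement is the Claim_ definition above) =====
theorem format_sculpture_spec : Claim_equal_format_sculpture := by
  intro blocks _
  exact main_eq blocks
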